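-- pv_equiv track=rewrite | github.com/Valokoodari/advent-of-code | 2016/solutions/day_01.py | part_2
-- ===== SOURCE A (Python) =====
-- DS = ((0, 1), (1, 0), (0, -1), (-1, 0))
--
-- def part_2(data):
--     ms, d, p, ps = [(m[0], int(m[1:])) for m in data.split(", ")], 0, (0,0), {(0,0)}
--
--     for t, m in ms:
--         d = (d + (1 if t == 'R' else -1)) % len(DS)
--         for _ in range(m):
--             p = (p[0] + DS[d][0], p[1] + DS[d][1])
--             if p in ps:
--                 return sum(map(abs, p))
--             ps.add(p)
--     return -1
-- ===== SOURCE B (Python) =====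
-- DS = ((0, 1), (1, 0), (0, -1), (-1, 0))
--
-- def part_2(data):
--     ms = [(m[0], int(m[1:])) for m in data.split(", ")]
--     # pass 1: expand instructions into a flat list of unit-step vectors
--     steps = []
--     d = 0
--     for t, m in ms:
--         d = (d + (1 if t == 'R' else -1)) % 4
--         steps += [DS[d]] * m
--     # pass 2: running sum -> ordered position list starting at (0, 0)
--     pos = [(0, 0)]
--     for s in steps:
--         pos.append((pos[-1][0] + s[0], pos[-1][1] + s[1]))
--     # pass 3: scan positions for the first repeat
--     seen = set()
--     for p in pos:
--         if p in seen:
--             return abs(p[0]) + abs(p[1])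
--         seen.add(p)
--     return -1
-- ===== Notes on version B (the rewrite author's own statement) =====
-- stated objective: alternative
-- what changed: A walks and checks in one interleaved nested loop; B decomposes into three passes: expand instructions into a flat unit-step list, accumulate it into the ordered position list, then scan that list with a seen-set for the first repeat.
import Mathlib
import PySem

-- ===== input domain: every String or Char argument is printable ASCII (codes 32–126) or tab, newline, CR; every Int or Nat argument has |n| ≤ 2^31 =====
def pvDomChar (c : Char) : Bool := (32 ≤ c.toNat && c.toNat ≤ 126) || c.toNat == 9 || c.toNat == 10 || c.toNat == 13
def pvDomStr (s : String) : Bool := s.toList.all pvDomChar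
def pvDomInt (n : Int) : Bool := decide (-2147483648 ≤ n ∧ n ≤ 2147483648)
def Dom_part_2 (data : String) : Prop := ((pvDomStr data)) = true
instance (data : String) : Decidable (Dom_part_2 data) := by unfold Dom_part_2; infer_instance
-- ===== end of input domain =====

-- B splits A's single interleaved walk/check loop into three passes (expand to unit steps,
-- accumulate positions, scan for the first repeat): objective 'alternative', same cost.

-- shared context: the DS table and the parsing comprehension, identical in both Pythons
def pvDS : List (Int × Int) := [(0, 1), (1, 0), (0, -1), (-1, 0)]

-- DS[d]; d is always (… ) % 4 here, so the lookup never fails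
def pvDir (d : Int) : Int × Int := (PySem.List.pyGet? pvDS d).getD (0, 0)

-- (m[0], int(m[1:])) — none where Python raises (empty token / int() ValueError)
def pvParseTok (tok : List Char) : Option (Char × Int) :=
  match tok with
  | [] => none
  | c :: rest => (PySem.Int.ofChars? rest).map (fun n => (c, n))

-- [(m[0], int(m[1:])) for m in data.split(", ")]
def pvParse (data : String) : Option (List (Char × Int)) :=
  (PySem.Chars.splitOn data.toList (", ".toList)).mapM pvParseTok

-- ===== PORT A =====
-- inner 'for _ in range(m)' loop: step, check membership, early return or add and continue
def pvInnerA (v : Int × Int) : Nat → (Int × Int) → PySem.Set (Int × Int) →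
    Int ⊕ ((Int × Int) × PySem.Set (Int × Int))
  | 0, p, ps => .inr (p, ps)
  | m + 1, p, ps =>
    let p' := (p.1 + v.1, p.2 + v.2)
    if PySem.Set.contains ps p' then .inl (|p'.1| + |p'.2|)
    else pvInnerA v m p' (PySem.Set.add ps p')

-- outer 'for t, m in ms' loop
def pvOuterA : List (Char × Int) → Int → (Int × Int) → PySem.Set (Int × Int) → Int
  | [], _, _, _ => -1
  | (t, m) :: rest, d, p, ps =>
    let d' := PySem.Int.mod (d + (if t = 'R' then 1 else -1)) 4
    match pvInnerA (pvDir d') m.toNat p ps with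
    | .inl r => r
    | .inr (p', ps') => pvOuterA rest d' p' ps'

def part_2 (data : String) : Int :=
  match pvParse data with
  | none => 0  -- Python raises here; excluded by Pre_part_2
  | some ms => pvOuterA ms 0 (0, 0) (PySem.Set.ofList [((0 : Int), (0 : Int))])

-- ===== PORT B =====
-- pass 1: expand instructions into a flat list of unit-step vectors ([DS[d]] * m)
def pvExpand : List (Char × Int) → Int → List (Int × Int)
  | [], _ => []
  | (t, m) :: rest, d =>
    let d' := PySem.Int.mod (d + (if t = 'R' then 1 else -1)) 4
    List.replicate m.toNat (pvDir d') ++ pvExpand rest d'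

-- pass 2: running sum of the steps -> ordered position list starting at p
def pvAccum : (Int × Int) → List (Int × Int) → List (Int × Int)
  | p, [] => [p]
  | p, s :: rest => p :: pvAccum (p.1 + s.1, p.2 + s.2) rest

-- pass 3: scan the positions for the first repeat
def pvScan : List (Int × Int) → PySem.Set (Int × Int) → Int
  | [], _ => -1
  | p :: rest, seen =>
    if PySem.Set.contains seen p then |p.1| + |p.2|
    else pvScan rest (PySem.Set.add seen p)

def part_2_alt (data : String) : Int :=
  match pvParse data with
  | none => 0  -- Python raises here; excluded by Pre_part_2
  | some ms => pvScan (pvAccum (0, 0) (pvExpand ms 0)) PySem.Set.empty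

-- ===== PRECONDITION & SPEC =====
-- Pre_ excludes exactly the inputs where A raises: a token of data.split(", ") that is empty
-- (IndexError on m[0]) or whose tail is not an int literal (ValueError on int(m[1:])).
def Pre_part_2 (data : String) : Prop :=
  ∀ tok ∈ PySem.Chars.splitOn data.toList (", ".toList),
    tok ≠ [] ∧ (PySem.Int.ofChars? tok.tail).isSome = true
instance (data : String) : Decidable (Pre_part_2 data) := by unfold Pre_part_2; infer_instance

def pvWitness_part_2 : String := "R8, R4, R4, R8"

def Spec_part_2 (data : String) (out : Int) : Prop := out = part_2_alt data
instance (data : String) (out : Int) : Decidable (Spec_part_2 data out) := by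
  unfold Spec_part_2; infer_instance

-- ===== CLAIM (what is proved, stated in full; the proofs are below) =====
def Claim_equal_part_2 : Prop :=
  ∀ (data : String), Dom_part_2 data → Pre_part_2 data → Spec_part_2 data (part_2 data)

-- ===== LEMMAS AND PROOFS =====

-- positions after the first: the tail of pvAccum p l
def pvTail : (Int × Int) → List (Int × Int) → List (Int × Int)
  | _, [] => []
  | p, s :: rest => (p.1 + s.1, p.2 + s.2) :: pvTail (p.1 + s.1, p.2 + s.2) rest

theorem pvAccum_eq (l : List (Int × Int)) (p : Int × Int) :
    pvAccum p l = p :: pvTail p l := by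
  induction l generalizing p with
  | nil => rfl
  | cons s rest ih => simp [pvAccum, pvTail, ih]

theorem pvTail_append (l₁ l₂ : List (Int × Int)) (p : Int × Int) :
    pvTail p (l₁ ++ l₂) =
      pvTail p l₁ ++ pvTail (l₁.foldl (fun q s => (q.1 + s.1, q.2 + s.2)) p) l₂ := by
  induction l₁ generalizing p with
  | nil => rfl
  | cons s rest ih => simp [pvTail, ih]

theorem pvInnerA_endpoint (v : Int × Int) (m : Nat) :
    ∀ (p : Int × Int) (ps : PySem.Set (Int × Int)) p' ps',
      pvInnerA v m p ps = .inr (p', ps') →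
      p' = (List.replicate m v).foldl (fun q s => (q.1 + s.1, q.2 + s.2)) p := by
  induction m with
  | zero => intro p ps p' ps' h; simp [pvInnerA] at h; simp [h.1]
  | succ m ih =>
    intro p ps p' ps' h
    simp only [pvInnerA] at h
    split at h
    · exact absurd h (by simp)
    · simpa [List.replicate_succ] using ih _ _ _ _ h

theorem pvScan_inner (v : Int × Int) (m : Nat) :
    ∀ (p : Int × Int) (ps : PySem.Set (Int × Int)) (rest : List (Int × Int)),
      pvScan (pvTail p (List.replicate m v) ++ rest) ps =
        match pvInnerA v m p ps with
        | .inl r => r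
        | .inr (_, ps') => pvScan rest ps' := by
  induction m with
  | zero => intro p ps rest; rfl
  | succ m ih =>
    intro p ps rest
    simp only [List.replicate_succ, pvTail, pvInnerA, List.cons_append, pvScan]
    split
    · rfl
    · exact ih _ _ _

theorem pvOuterA_eq_scan (ms : List (Char × Int)) :
    ∀ (d : Int) (p : Int × Int) (ps : PySem.Set (Int × Int)),
      pvOuterA ms d p ps = pvScan (pvTail p (pvExpand ms d)) ps := by
  induction ms with
  | nil => intro d p ps; rfl
  | cons tm rest ih =>
    intro d p ps
    obtain ⟨t, m⟩ := tm
    simp only [pvOuterA, pvExpand, pvTail_append, pvScan_inner]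
    cases h : pvInnerA (pvDir (PySem.Int.mod (d + (if t = 'R' then 1 else -1)) 4)) m.toNat p ps with
    | inl r => rfl
    | inr q =>
      obtain ⟨p', ps'⟩ := q
      dsimp only
      rw [ih, pvInnerA_endpoint _ _ _ _ _ _ h]

-- ===== VERDICT (by name: the statement is the Claim_ definition above) =====
theorem part_2_spec : Claim_equal_part_2 := by
  intro data _ _
  unfold Spec_part_2 part_2 part_2_alt
  cases h : pvParse data with
  | none => rfl
  | some ms =>
    dsimp only
    rw [pvOuterA_eq_scan, pvAccum_eq]
    rfl
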